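-- pv_equiv track=rewrite | github.com/yeonnseok/ps-algorithm | past_problems/frog.py | solution
-- ===== SOURCE A (Python) =====
-- def solution(word):
--     answer = ''
--     wiki = {}  # wiki 라는 이름의 사전을 정의하고 청개구리 사전을 완성한다.
--     j = 25
--     for i in range(26):
--         wiki[chr(65+i)] = chr(65+j)
--         wiki[chr(97+i)] = chr(97+j)
--         j -= 1
--
--     # 주어진 단어의 각 문자들을 사전에 있는 지 검사하여 있으면 변환하여 answer에 더하고
--     # 없다면(공백등의 알파벳 외의 문자) 그냥 추가한다.
--     for ch in word:
--         if ch in wiki: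
--             answer += wiki[ch]
--         else:
--             answer += ch
--     return answer
-- ===== SOURCE B (Python) =====
-- def solution(word):
--     return ''.join(
--         chr(155 - ord(ch)) if 'A' <= ch <= 'Z'
--         else chr(219 - ord(ch)) if 'a' <= ch <= 'z'
--         else ch
--         for ch in word)
-- ===== Notes on version B (the rewrite author's own statement) =====
-- stated objective: idiomatic
-- what changed: Drops the precomputed 52-entry reversal dictionary and its lookup loop; a single str.join over a generator maps each letter with the closed-form arithmetic mirror chr(155-ord) / chr(219-ord), other characters unchanged.
import Mathlib
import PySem

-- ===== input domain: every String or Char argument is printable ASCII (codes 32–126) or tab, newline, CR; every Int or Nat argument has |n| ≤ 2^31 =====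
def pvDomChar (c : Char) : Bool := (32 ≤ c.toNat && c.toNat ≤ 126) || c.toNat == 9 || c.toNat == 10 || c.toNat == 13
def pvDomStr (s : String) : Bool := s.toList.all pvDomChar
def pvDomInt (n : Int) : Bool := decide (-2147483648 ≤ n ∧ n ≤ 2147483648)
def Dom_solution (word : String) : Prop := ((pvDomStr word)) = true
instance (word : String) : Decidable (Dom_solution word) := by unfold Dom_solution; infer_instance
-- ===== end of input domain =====

set_option maxRecDepth 4000


-- B is an idiomatic rewrite: the 52-entry reversal dictionary is replaced by a
-- closed-form arithmetic mirror on explicit ASCII letter ranges; same cost.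

-- ===== PORT A =====
-- the dict built by A's first loop: j starts at 25 and decreases each step
def pvWiki : PySem.Dict Char Char :=
  ((PySem.List.pyRange 0 26 1).foldl
    (fun (st : PySem.Dict Char Char × Int) i =>
      (((st.1.insert (Char.ofNat (65 + i).toNat) (Char.ofNat (65 + st.2).toNat)).insert
          (Char.ofNat (97 + i).toNat) (Char.ofNat (97 + st.2).toNat)), st.2 - 1))
    (PySem.Dict.empty, 25)).1

def solution (word : String) : String :=
  String.mk (word.toList.foldl
    (fun acc ch =>
      acc ++ [if pvWiki.contains ch then (pvWiki.get? ch).getD ch else ch]) [])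

-- ===== PORT B =====
def pvMirror (ch : Char) : Char :=
  if 'A' ≤ ch ∧ ch ≤ 'Z' then Char.ofNat (155 - ch.toNat)
  else if 'a' ≤ ch ∧ ch ≤ 'z' then Char.ofNat (219 - ch.toNat)
  else ch

def solution_alt (word : String) : String :=
  String.mk (word.toList.map pvMirror)

-- ===== PRECONDITION & SPEC =====
def Spec_solution (word : String) (out : String) : Prop := out = solution_alt word
instance (word : String) (out : String) : Decidable (Spec_solution word out) := by unfold Spec_solution; infer_instance

-- ===== CLAIM (what is proved, stated in full; the proofs are below) =====
def Claim_equal_solution : Prop := ∀ (word : String), Dom_solution word → Spec_solution word (solution word)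

-- ===== LEMMAS AND PROOFS =====
-- per-character agreement on all ASCII codes (checked exhaustively)
theorem pvStep_eq_mirror_ofNat :
    ∀ n : Nat, n < 128 →
      (if pvWiki.contains (Char.ofNat n) then (pvWiki.get? (Char.ofNat n)).getD (Char.ofNat n)
       else Char.ofNat n) = pvMirror (Char.ofNat n) := by decide

theorem pvStep_eq_mirror (ch : Char) (h : pvDomChar ch = true) :
    (if pvWiki.contains ch then (pvWiki.get? ch).getD ch else ch) = pvMirror ch := by
  have hlt : ch.toNat < 128 := by
    simp [pvDomChar] at h
    omega
  have hch : Char.ofNat ch.toNat = ch := Char.ofNat_toNat ch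
  calc (if pvWiki.contains ch then (pvWiki.get? ch).getD ch else ch)
      = (if pvWiki.contains (Char.ofNat ch.toNat) then
           (pvWiki.get? (Char.ofNat ch.toNat)).getD (Char.ofNat ch.toNat)
         else Char.ofNat ch.toNat) := by rw [hch]
    _ = pvMirror (Char.ofNat ch.toNat) := pvStep_eq_mirror_ofNat ch.toNat hlt
    _ = pvMirror ch := by rw [hch]

-- ===== VERDICT (by name: the statement is the Claim_ definition above) =====
theorem solution_spec : Claim_equal_solution := by
  intro word hdom
  unfold Spec_solution solution solution_alt
  rw [PySem.List.foldl_append_singleton_eq_map]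
  simp only [List.nil_append]
  congr 1
  apply List.map_congr_left
  intro ch hch
  exact pvStep_eq_mirror ch (by
    have := hdom
    simp only [Dom_solution, pvDomStr, List.all_eq_true] at this
    exact this ch hch)
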